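-- pv_equiv track=rewrite | github.com/linhdvu14/cp-sols | sols/CodeChef/FEB221A/REMADJ.py | solve
-- ===== SOURCE A (Python) =====
-- def solve(N, A):
--     S = sum(A)
--
--     pref = [0]
--     for a in A: pref.append(pref[-1] + a)
--
--     pref_idx = {}
--     for i, p in enumerate(pref):
--         if p not in pref_idx: pref_idx[p] = []
--         pref_idx[p].append(i)
--
--     # check possible partition sums
--     cc = 1
--     checked = set()
--     for i, p in enumerate(pref):
--         if i == 0 or p in checked or (p == 0 and S != 0) or (p != 0 and S % p != 0): continue
--         last, msz, sz = i-1, -1, 1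
--         while p * sz in pref_idx:
--             idx = pref_idx[p * sz]
--             found = False
--             for j in idx:
--                 if j > last:
--                     last = j
--                     found = True
--                     break
--             if not found: break
--             if pref[N] - pref[last] == 0: msz = sz
--             sz += 1
--
--         cc = max(cc, msz)
--         checked.add(p)
--
--     return N - cc
-- ===== SOURCE B (Python) =====
-- def solve(N, A):
--     S = sum(A)
--     pref = [0]
--     run = 0
--     for a in A:
--         run += a
--         pref.append(run)
--     best = 1
--     seen = set()
--     for v in pref[1:]:
--         if v in seen or (v == 0 and S != 0) or (v != 0 and S % v != 0):
--             continue
--         mult, msz = 1, -1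
--         for j in range(1, len(pref)):
--             if pref[j] == v * mult:
--                 if pref[N] == pref[j]:
--                     msz = mult
--                 mult += 1
--         best = max(best, msz)
--         seen.add(v)
--     return N - best
-- ===== Notes on version B (the rewrite author's own statement) =====
-- stated objective: simpler
-- what changed: B drops A's dict-of-index-lists and the while-loop over multiples with its repeated from-the-start scans of each index list, and instead runs one left-to-right scan over the prefix array per distinct candidate sum, advancing the expected target v, 2v, 3v, ... as matches are found.
import Mathlib
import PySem

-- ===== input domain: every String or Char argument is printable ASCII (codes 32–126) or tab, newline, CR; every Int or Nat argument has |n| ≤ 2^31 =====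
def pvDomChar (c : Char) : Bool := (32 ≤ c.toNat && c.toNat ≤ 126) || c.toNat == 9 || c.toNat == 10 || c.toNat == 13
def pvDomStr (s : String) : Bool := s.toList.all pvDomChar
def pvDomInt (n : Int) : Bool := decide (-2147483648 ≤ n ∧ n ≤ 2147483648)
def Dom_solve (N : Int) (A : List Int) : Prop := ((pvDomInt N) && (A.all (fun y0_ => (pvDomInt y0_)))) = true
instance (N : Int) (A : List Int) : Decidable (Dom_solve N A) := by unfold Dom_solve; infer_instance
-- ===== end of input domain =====

-- B replaces A's dict-of-index-lists and while-loop-over-multiples by one left-to-right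
-- greedy scan of the prefix array per distinct candidate sum (objective: simpler).
-- Outside Pre_solve the Python A raises IndexError at pref[N]; there the ports read that
-- cell with default 0 (nothing is claimed there).

-- ===== PORT A =====
-- pref = [0]; for a in A: pref.append(pref[-1] + a)
def buildPref (A : List Int) : List Int :=
  A.foldl (fun pr a => pr ++ [pr.getLastD 0 + a]) [0]

-- pref_idx = {}; for i, p in enumerate(pref): if p not in pref_idx: pref_idx[p] = []; pref_idx[p].append(i)
def buildIdx (pref : List Int) : PySem.Dict Int (List Int) :=
  (PySem.List.enumerate pref).foldl
    (fun d ip =>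
      let d' := if d.contains ip.2 then d else d.insert ip.2 []
      d'.insert ip.2 (d'.getD ip.2 [] ++ [ip.1]))
    PySem.Dict.empty

-- the 'while p * sz in pref_idx' loop; fuel = pref.length + 1 bounds the iterations
-- (each successful step strictly increases 'last', which stays below pref.length)
def whileA (prefIdx : PySem.Dict Int (List Int)) (pref : List Int) (N p : Int)
    (last msz sz : Int) : Nat → Int
  | 0 => msz
  | fuel + 1 =>
    match prefIdx.get? (p * sz) with
    | none => msz
    | some idx =>
      match idx.find? (fun j => decide (last < j)) with
      | none => msz
      | some j =>
        whileA prefIdx pref N p j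
          (if PySem.List.pyGetD pref N 0 - PySem.List.pyGetD pref j 0 = 0 then sz else msz)
          (sz + 1) fuel

def stepA (S N : Int) (prefIdx : PySem.Dict Int (List Int)) (pref : List Int)
    (st : Int × PySem.Set Int) (ip : Int × Int) : Int × PySem.Set Int :=
  if ip.1 == 0 || st.2.contains ip.2 || (ip.2 == 0 && S != 0)
      || (ip.2 != 0 && PySem.Int.mod S ip.2 != 0) then st
  else (max st.1 (whileA prefIdx pref N ip.2 (ip.1 - 1) (-1) 1 (pref.length + 1)),
        st.2.add ip.2)

def solve (N : Int) (A : List Int) : Int :=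
  let S := A.sum
  let pref := buildPref A
  let prefIdx := buildIdx pref
  let res := (PySem.List.enumerate pref).foldl (stepA S N prefIdx pref)
    (1, PySem.Set.ofList [])
  N - res.1

-- ===== PORT B =====
-- one forward scan of pref for candidate v: advance the expected target v*mult on a match
def scanB (N v : Int) (pref : List Int) : Int × Int :=
  (PySem.List.pyRange 1 (pref.length : Int)).foldl
    (fun ms j =>
      if PySem.List.pyGetD pref j 0 == v * ms.1
      then (ms.1 + 1,
            if PySem.List.pyGetD pref N 0 == PySem.List.pyGetD pref j 0 then ms.1 else ms.2)
      else ms)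
    (1, -1)

def stepB (S N : Int) (pref : List Int) (st : Int × PySem.Set Int) (v : Int) :
    Int × PySem.Set Int :=
  if st.2.contains v || (v == 0 && S != 0) || (v != 0 && PySem.Int.mod S v != 0) then st
  else (max st.1 (scanB N v pref).2, st.2.add v)

def solve_alt (N : Int) (A : List Int) : Int :=
  let S := A.sum
  let pref := (A.foldl (fun (st : List Int × Int) a => (st.1 ++ [st.2 + a], st.2 + a)) ([0], 0)).1
  let res := (pref.drop 1).foldl (stepB S N pref) (1, PySem.Set.ofList [])
  N - res.1

-- ===== PRECONDITION & SPEC =====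
-- Exactly the inputs on which the Python A returns: for nonempty A the loop always reaches
-- pref[N] (len(pref) = len(A)+1), which raises IndexError unless -(len(A)+1) <= N <= len(A);
-- for A = [] no candidate is ever examined and A returns N - 1 for every N.
def Pre_solve (N : Int) (A : List Int) : Prop :=
  A = [] ∨ (-((A.length : Int) + 1) ≤ N ∧ N ≤ (A.length : Int))
instance (N : Int) (A : List Int) : Decidable (Pre_solve N A) := by
  unfold Pre_solve; infer_instance

def pvWitness_solve : Int × List Int := (3, [1, 1, 1])

def Spec_solve (N : Int) (A : List Int) (out : Int) : Prop := out = solve_alt N A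
instance (N : Int) (A : List Int) (out : Int) : Decidable (Spec_solve N A out) := by
  unfold Spec_solve; infer_instance

-- ===== CLAIM (what is proved, stated in full; the proofs are below) =====
def Claim_equal_solve : Prop :=
  ∀ (N : Int) (A : List Int), Dom_solve N A → Pre_solve N A → Spec_solve N A (solve N A)

-- ===== LEMMAS AND PROOFS =====

-- both prefix constructions are List.scanl (+) 0
theorem buildPref_aux (A : List Int) :
    ∀ (pr : List Int) (s : Int),
      (A.foldl (fun pr a => pr ++ [pr.getLastD 0 + a]) (pr ++ [s]))
        = pr ++ List.scanl (· + ·) s A := by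
  induction A with
  | nil => intro pr s; simp
  | cons a A ih =>
    intro pr s
    simp only [List.foldl_cons, List.getLastD_concat, List.scanl_cons]
    have h : (pr ++ [s]) ++ [s + a] = (pr ++ [s]) ++ [s + a] := rfl
    have := ih (pr ++ [s]) (s + a)
    simpa using this

theorem buildPref_eq (A : List Int) : buildPref A = List.scanl (· + ·) 0 A := by
  have := buildPref_aux A [] 0
  simpa [buildPref] using this

theorem buildPrefB_aux (A : List Int) :
    ∀ (pr : List Int) (s : Int),
      ((A.foldl (fun (st : List Int × Int) a => (st.1 ++ [st.2 + a], st.2 + a)) (pr ++ [s], s)).1)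
        = pr ++ List.scanl (· + ·) s A := by
  induction A with
  | nil => intro pr s; simp
  | cons a A ih =>
    intro pr s
    simp only [List.foldl_cons, List.scanl_cons]
    have := ih (pr ++ [s]) (s + a)
    simpa using this

theorem buildPrefB_eq (A : List Int) :
    (A.foldl (fun (st : List Int × Int) a => (st.1 ++ [st.2 + a], st.2 + a)) ([0], 0)).1
      = List.scanl (· + ·) 0 A := by
  have := buildPrefB_aux A [] 0
  simpa using this

-- occurrence list of value t in cs at positions s, s+1, ...
def occ : List Int → Int → Int → List Int
  | [], _, _ => []
  | c :: cs, s, t => if c = t then s :: occ cs (s + 1) t else occ cs (s + 1) t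

-- first position j ≥ s (counting from s) with value t and last < j
def firstIdx : List Int → Int → Int → Int → Option Int
  | [], _, _, _ => none
  | c :: cs, s, t, last =>
    if c = t ∧ last < s then some s else firstIdx cs (s + 1) t last

-- the dict built by A maps t to its occurrence list
theorem buildIdx_aux (l : List (Int × Int)) :
    ∀ (d : PySem.Dict Int (List Int)) (O : Int → List Int),
      (∀ t, d.get? t = if O t = [] then none else some (O t)) →
      ∀ t, (l.foldl (fun d ip =>
              let d' := if d.contains ip.2 then d else d.insert ip.2 []
              d'.insert ip.2 (d'.getD ip.2 [] ++ [ip.1])) d).get? t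
        = (if O t ++ (l.filterMap fun ip => if ip.2 = t then some ip.1 else none) = []
           then none
           else some (O t ++ (l.filterMap fun ip => if ip.2 = t then some ip.1 else none))) := by
  induction l with
  | nil => intro d O hO t; simpa using hO t
  | cons iv l ih =>
    intro d O hO t
    obtain ⟨i, v⟩ := iv
    have hgetD : (if d.contains v then d else d.insert v []).getD v [] = O v := by
      by_cases hc : d.contains v = true
      · rw [if_pos hc, PySem.Dict.getD_eq_get?_getD, hO v]
        by_cases h0 : O v = []
        · exfalso; rw [PySem.Dict.contains_eq_isSome_get?, hO v, if_pos h0] at hc; simp at hc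
        · simp [h0]
      · have h0 : O v = [] := by
          by_contra h0
          rw [PySem.Dict.contains_eq_isSome_get?, hO v, if_neg h0] at hc; simp at hc
        rw [if_neg hc, h0]
        simp [PySem.Dict.getD_eq_get?_getD, PySem.Dict.get?_insert_self]
    have hstep : ∀ t', ((if d.contains v then d else d.insert v []).insert v
        ((if d.contains v then d else d.insert v []).getD v [] ++ [i])).get? t'
        = if t' = v then some (O v ++ [i]) else d.get? t' := by
      intro t'
      rw [hgetD, PySem.Dict.get?_insert]
      by_cases ht : t' = v
      · simp [ht]
      · rw [if_neg ht, if_neg ht]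
        by_cases hc : d.contains v = true
        · rw [if_pos hc]
        · rw [if_neg hc, PySem.Dict.get?_insert, if_neg ht]
    simp only [List.foldl_cons]
    have hmain := ih ((if d.contains v then d else d.insert v []).insert v
        ((if d.contains v then d else d.insert v []).getD v [] ++ [i]))
      (fun t' => if t' = v then O v ++ [i] else O t')
      (by
        intro t'
        rw [hstep t']
        by_cases ht : t' = v
        · simp [ht]
        · simp only [if_neg ht]; exact hO t') t
    have hlist : (if t = v then O v ++ [i] else O t)
        ++ (l.filterMap fun ip => if ip.2 = t then some ip.1 else none)
        = O t ++ (((i, v) :: l).filterMap fun ip => if ip.2 = t then some ip.1 else none) := by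
      by_cases ht : t = v
      · subst ht; simp
      · have hvt : ¬ v = t := fun h => ht h.symm
        simp [ht, hvt]
    rw [← hlist]
    exact hmain

theorem occ_eq_filterMap (cs : List Int) :
    ∀ (s : Int) (t : Int),
      occ cs s t
        = ((PySem.List.enumerate cs s).filterMap fun ip => if ip.2 = t then some ip.1 else none) := by
  induction cs with
  | nil => intro s t; simp [occ, PySem.List.enumerate]
  | cons c cs ih =>
    intro s t
    rw [PySem.List.enumerate_cons]
    by_cases h : c = t <;> simp [occ, h, ih (s + 1) t]

theorem buildIdx_get? (pref : List Int) (t : Int) :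
    (buildIdx pref).get? t = if occ pref 0 t = [] then none else some (occ pref 0 t) := by
  have h := buildIdx_aux (PySem.List.enumerate pref 0) PySem.Dict.empty (fun _ => [])
    (by intro t; simp [PySem.Dict.get?_empty]) t
  rw [buildIdx, h, occ_eq_filterMap]
  simp

-- find? over the occurrence list is firstIdx
theorem find_occ (cs : List Int) :
    ∀ (s t last : Int),
      (occ cs s t).find? (fun j => decide (last < j)) = firstIdx cs s t last := by
  induction cs with
  | nil => intro s t last; simp [occ, firstIdx]
  | cons c cs ih =>
    intro s t last
    by_cases h : c = t
    · by_cases h2 : last < s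
      · simp [occ, firstIdx, h, h2]
      · simp [occ, firstIdx, h, h2, ih (s + 1) t last]
    · simp [occ, firstIdx, h, ih (s + 1) t last]

-- A's while loop with dict lookups replaced by firstIdx on pref
def whileC (pref : List Int) (N p : Int) (last msz sz : Int) : Nat → Int
  | 0 => msz
  | fuel + 1 =>
    match firstIdx pref 0 (p * sz) last with
    | none => msz
    | some j =>
      whileC pref N p j
        (if PySem.List.pyGetD pref N 0 - PySem.List.pyGetD pref j 0 = 0 then sz else msz)
        (sz + 1) fuel

theorem whileA_eq_whileC (pref : List Int) (N p : Int) :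
    ∀ (fuel : Nat) (last msz sz : Int),
      whileA (buildIdx pref) pref N p last msz sz fuel = whileC pref N p last msz sz fuel := by
  intro fuel
  induction fuel with
  | zero => intro last msz sz; rfl
  | succ fuel ih =>
    intro last msz sz
    rw [whileA, whileC, buildIdx_get? pref (p * sz), ← find_occ pref 0 (p * sz) last]
    by_cases h : occ pref 0 (p * sz) = []
    · rw [if_pos h, h]; simp
    · rw [if_neg h]
      cases hf : (occ pref 0 (p * sz)).find? (fun j => decide (last < j)) with
      | none => simp [hf]
      | some j => simp [hf, ih]

theorem firstIdx_none_of_short (cs : List Int) :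
    ∀ (s t last : Int), s + cs.length ≤ last + 1 → firstIdx cs s t last = none := by
  induction cs with
  | nil => intro _ _ _ _; rfl
  | cons c cs ih =>
    intro s t last h
    simp only [List.length_cons] at h
    have hs : ¬ last < s := by omega
    simp [firstIdx, hs, ih (s + 1) t last (by omega)]

theorem firstIdx_split (cs₁ : List Int) :
    ∀ (cs₂ : List Int) (s t last : Int), s + cs₁.length = last + 1 →
      firstIdx (cs₁ ++ cs₂) s t last = firstIdx cs₂ (last + 1) t last := by
  induction cs₁ with
  | nil => intro cs₂ s t last h; simp at h; subst h; rfl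
  | cons c cs ih =>
    intro cs₂ s t last h
    simp only [List.length_cons] at h
    have hs : ¬ last < s := by omega
    rw [List.cons_append, firstIdx, if_neg (show ¬(c = t ∧ last < s) by omega)]
    exact ih cs₂ (s + 1) t last (by omega)

theorem firstIdx_mono (cs : List Int) :
    ∀ (s t l₁ l₂ : Int), l₁ < s → l₂ < s → firstIdx cs s t l₁ = firstIdx cs s t l₂ := by
  induction cs with
  | nil => intro _ _ _ _ _ _; rfl
  | cons c cs ih =>
    intro s t l₁ l₂ h1 h2
    by_cases hc : c = t
    · simp [firstIdx, hc, h1, h2]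
    · simp only [firstIdx]
      rw [if_neg (show ¬(c = t ∧ l₁ < s) by tauto), if_neg (show ¬(c = t ∧ l₂ < s) by tauto)]
      exact ih (s + 1) t l₁ l₂ (by omega) (by omega)

theorem whileC_congr (pref : List Int) (N p : Int) (fuel : Nat) (l₁ l₂ msz sz : Int)
    (h : firstIdx pref 0 (p * sz) l₁ = firstIdx pref 0 (p * sz) l₂) :
    whileC pref N p l₁ msz sz fuel = whileC pref N p l₂ msz sz fuel := by
  cases fuel with
  | zero => rfl
  | succ fuel => rw [whileC, whileC, h]

-- B's scan body
def scanStep (pref : List Int) (N v : Int) (ms : Int × Int) (c : Int) : Int × Int :=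
  if c == v * ms.1
  then (ms.1 + 1, if PySem.List.pyGetD pref N 0 == c then ms.1 else ms.2)
  else ms

theorem scanB_eq_foldl (N v : Int) (pref : List Int) :
    scanB N v pref = (pref.drop 1).foldl (scanStep pref N v) (1, -1) := by
  unfold scanB
  have h := PySem.List.foldl_pyRange_pyGetD' pref 0 (scanStep pref N v)
    ((1 : Int), (-1 : Int)) (show (0:Int) ≤ 1 by norm_num)
  simpa [scanStep] using h

-- the core equivalence: A's while loop = B's scan over the tail suffix
theorem main_scan (pref : List Int) (N p : Int) :
    ∀ (cs₂ cs₁ : List Int) (msz sz : Int) (fuel : Nat),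
      pref = cs₁ ++ cs₂ → 1 ≤ cs₁.length → cs₂.length + 1 ≤ fuel →
      whileC pref N p ((cs₁.length : Int) - 1) msz sz fuel
        = (cs₂.foldl (scanStep pref N p) (sz, msz)).2 := by
  intro cs₂
  induction cs₂ with
  | nil =>
    intro cs₁ msz sz fuel hp h1 hf
    obtain ⟨fuel, rfl⟩ : ∃ f, fuel = f + 1 := ⟨fuel - 1, by omega⟩
    rw [whileC]
    have hnone : firstIdx pref 0 (p * sz) ((cs₁.length : Int) - 1) = none := by
      apply firstIdx_none_of_short
      have : pref.length = cs₁.length := by rw [hp]; simp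
      omega
    rw [hnone]
    rfl
  | cons c rest ih =>
    intro cs₁ msz sz fuel hp h1 hf
    obtain ⟨fuel, rfl⟩ : ∃ f, fuel = f + 1 := ⟨fuel - 1, by omega⟩
    have hs0 : (0 : Int) + (cs₁.length : Int) = ((cs₁.length : Int) - 1) + 1 := by ring
    have hsplit : ∀ t, firstIdx pref 0 t ((cs₁.length : Int) - 1)
        = firstIdx (c :: rest) (((cs₁.length : Int) - 1) + 1) t ((cs₁.length : Int) - 1) := by
      intro t
      rw [hp]
      exact firstIdx_split cs₁ (c :: rest) 0 t ((cs₁.length : Int) - 1) (by ring)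
    have hgetc : PySem.List.pyGetD pref (cs₁.length : Int) 0 = c := by
      rw [PySem.List.pyGetD_of_nonneg pref 0 (by positivity)]
      rw [hp]
      simp [List.getD_eq_getElem?_getD]
    by_cases hc : c = p * sz
    · -- matched: A takes index cs₁.length, B's scan consumes c
      have hfound : firstIdx pref 0 (p * sz) ((cs₁.length : Int) - 1)
          = some (((cs₁.length : Int) - 1) + 1) := by
        rw [hsplit]
        rw [firstIdx]
        rw [if_pos ⟨hc, by omega⟩]
      rw [whileC, hfound]
      have hlen1 : ((cs₁.length : Int) - 1) + 1 = (cs₁.length : Int) := by ring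
      rw [hlen1]
      show whileC pref N p (cs₁.length : Int)
        (if PySem.List.pyGetD pref N 0 - PySem.List.pyGetD pref (cs₁.length : Int) 0 = 0
         then sz else msz) (sz + 1) fuel = _
      rw [hgetc]
      have hstep : List.foldl (scanStep pref N p) (sz, msz) (c :: rest)
          = List.foldl (scanStep pref N p) (sz + 1,
              if PySem.List.pyGetD pref N 0 - c = 0 then sz else msz) rest := by
        rw [List.foldl_cons]
        have hbeq : (c == p * sz) = true := by simp [hc]
        simp only [scanStep, hbeq, if_true]
        congr 2
        by_cases hN : PySem.List.pyGetD pref N 0 = c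
        · simp [hN]
        · have : ¬ (PySem.List.pyGetD pref N 0 - c = 0) := by
            intro h; exact hN (by omega)
          simp [hN, this]
      rw [hstep]
      have := ih (cs₁ ++ [c])
        (if PySem.List.pyGetD pref N 0 - c = 0 then sz else msz) (sz + 1) fuel
        (by rw [hp]; simp) (by simp) (by simp only [List.length_cons] at hf; omega)
      have hlen2 : ((cs₁ ++ [c]).length : Int) - 1 = (cs₁.length : Int) := by
        push_cast [List.length_append, List.length_cons, List.length_nil]; ring
      rw [hlen2] at this
      exact this
    · -- not matched: both sides skip position cs₁.length
      have hskip : firstIdx pref 0 (p * sz) ((cs₁.length : Int) - 1)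
          = firstIdx pref 0 (p * sz) (cs₁.length : Int) := by
        have hL : firstIdx pref 0 (p * sz) ((cs₁.length : Int) - 1)
            = firstIdx rest ((cs₁.length : Int) + 1) (p * sz) ((cs₁.length : Int) - 1) := by
          rw [hsplit, firstIdx, if_neg (fun hh => hc hh.1)]
          have e : (((cs₁.length : Int) - 1) + 1) + 1 = (cs₁.length : Int) + 1 := by ring
          rw [e]
        have hR : firstIdx pref 0 (p * sz) (cs₁.length : Int)
            = firstIdx rest ((cs₁.length : Int) + 1) (p * sz) (cs₁.length : Int) := by
          rw [hp, show cs₁ ++ c :: rest = (cs₁ ++ [c]) ++ rest by simp]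
          have hlen : (0 : Int) + (((cs₁ ++ [c]).length : Int)) = (cs₁.length : Int) + 1 := by
            simp only [List.length_append, List.length_cons, List.length_nil]
            push_cast; ring
          exact firstIdx_split (cs₁ ++ [c]) rest 0 (p * sz) (cs₁.length : Int) hlen
        rw [hL, hR]
        exact firstIdx_mono rest ((cs₁.length : Int) + 1) (p * sz)
          ((cs₁.length : Int) - 1) (cs₁.length : Int) (by omega) (by omega)
      have hcongr := whileC_congr pref N p (fuel + 1) ((cs₁.length : Int) - 1)
        (cs₁.length : Int) msz sz hskip
      rw [hcongr]
      have hstep : List.foldl (scanStep pref N p) (sz, msz) (c :: rest)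
          = List.foldl (scanStep pref N p) (sz, msz) rest := by
        rw [List.foldl_cons]
        have hbeq : (c == p * sz) = false := by simp [hc]
        simp [scanStep, hbeq]
      rw [hstep]
      have := ih (cs₁ ++ [c]) msz sz (fuel + 1)
        (by rw [hp]; simp) (by simp) (by simp only [List.length_cons] at hf ⊢; omega)
      have hlen2 : ((cs₁ ++ [c]).length : Int) - 1 = (cs₁.length : Int) := by
        push_cast [List.length_append, List.length_cons, List.length_nil]; ring
      rw [hlen2] at this
      exact this

-- skipping non-matching entries leaves the initial scan state unchanged
theorem scan_skip (pref : List Int) (N v : Int) :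
    ∀ (l : List Int), (∀ c ∈ l, c ≠ v) →
      l.foldl (scanStep pref N v) (1, -1) = (1, -1) := by
  intro l
  induction l with
  | nil => intro _; rfl
  | cons c l ih =>
    intro h
    have hc : ¬ (c == v * (1:Int)) = true := by
      simpa using h c (by simp)
    simp only [List.foldl_cons, scanStep, if_neg hc]
    exact ih (fun c hc' => h c (by simp [hc']))

def passP (S v : Int) : Prop := ¬(v = 0 ∧ S ≠ 0) ∧ ¬(v ≠ 0 ∧ PySem.Int.mod S v ≠ 0)

-- outer loops agree, given the 'checked'-set invariant
theorem outer_loop (S N : Int) (p0 : Int) (tl : List Int) :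
    ∀ (suf done : List Int) (st : Int × PySem.Set Int),
      tl = done ++ suf →
      (∀ v, st.2.contains v = true ↔ (v ∈ done ∧ passP S v)) →
      (PySem.List.enumerate suf (1 + (done.length : Int))).foldl
          (stepA S N (buildIdx (p0 :: tl)) (p0 :: tl)) st
        = suf.foldl (stepB S N (p0 :: tl)) st := by
  intro suf
  induction suf with
  | nil => intro done st _ _; simp [PySem.List.enumerate]
  | cons v suf ih =>
    intro done st htl hinv
    have hmeminv : ∀ w, w ∈ st.2 ↔ (w ∈ done ∧ passP S w) := fun w =>
      (PySem.Set.contains_iff st.2 w).symm.trans (hinv w)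
    rw [PySem.List.enumerate_cons, List.foldl_cons, List.foldl_cons]
    have hne0 : ((1 + (done.length : Int)) == 0) = false := by
      simp only [beq_eq_false_iff_ne, ne_eq]
      intro h
      omega
    have hstart : 1 + (done.length : Int) + 1 = 1 + (((done ++ [v]).length : Int)) := by
      push_cast [List.length_append, List.length_cons, List.length_nil]; ring
    by_cases hP : st.2.contains v = true ∨ ¬ passP S v
    · -- skipped element: both steps leave the state unchanged
      have hbool : (st.2.contains v || ((v == 0) && (S != 0))
          || ((v != 0) && (PySem.Int.mod S v != 0))) = true := by
        simp only [Bool.or_eq_true, Bool.and_eq_true, beq_iff_eq, bne_iff_ne]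
        rcases hP with hc | hnp
        · tauto
        · have hnp' : (v = 0 ∧ S ≠ 0) ∨ (v ≠ 0 ∧ PySem.Int.mod S v ≠ 0) := by
            unfold passP at hnp; tauto
          tauto
      have hstB : stepB S N (p0 :: tl) st v = st := by
        unfold stepB
        rw [hbool]
        rfl
      have hstA : stepA S N (buildIdx (p0 :: tl)) (p0 :: tl) st (1 + (done.length : Int), v)
          = st := by
        unfold stepA
        dsimp only
        rw [hne0, Bool.false_or, hbool]
        rfl
      rw [hstA, hstB, hstart]
      apply ih (done ++ [v]) st (by rw [htl]; simp)
      intro w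
      rw [hinv w]
      constructor
      · rintro ⟨hw, hp⟩; exact ⟨by simp [hw], hp⟩
      · rintro ⟨hw, hp⟩
        rcases List.mem_append.mp hw with hw | hw
        · exact ⟨hw, hp⟩
        · have hv : w = v := by simpa using hw
          subst hv
          rcases hP with hc | hnp
          · exact ⟨((hmeminv w).mp ((PySem.Set.contains_iff st.2 w).mp hc)).1, hp⟩
          · exact absurd hp hnp
    · -- processed element
      have hcont : st.2.contains v = false := by
        cases hcb : st.2.contains v with
        | false => rfl
        | true => exact absurd (Or.inl hcb) hP
      have hpass : passP S v := by
        by_contra h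
        exact hP (Or.inr h)
      have hbool : (st.2.contains v || ((v == 0) && (S != 0))
          || ((v != 0) && (PySem.Int.mod S v != 0))) = false := by
        cases hb : (st.2.contains v || ((v == 0) && (S != 0))
            || ((v != 0) && (PySem.Int.mod S v != 0))) with
        | false => rfl
        | true =>
          exfalso
          unfold passP at hpass
          rw [hcont] at hb
          simp only [Bool.false_or, Bool.or_eq_true, Bool.and_eq_true, beq_iff_eq,
            bne_iff_ne] at hb
          tauto
      have hvd : v ∉ done := by
        intro hm
        have hmem := (hmeminv v).mpr ⟨hm, hpass⟩
        have := (PySem.Set.contains_iff st.2 v).mpr hmem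
        rw [hcont] at this
        exact Bool.false_ne_true this
      have hpref : (p0 :: tl) = (p0 :: done) ++ (v :: suf) := by rw [htl]; rfl
      have hwa : whileA (buildIdx (p0 :: tl)) (p0 :: tl) N v
            (1 + (done.length : Int) - 1) (-1) 1 ((p0 :: tl).length + 1)
          = ((v :: suf).foldl (scanStep (p0 :: tl) N v) (1, -1)).2 := by
        rw [whileA_eq_whileC]
        have hms := main_scan (p0 :: tl) N v (v :: suf) (p0 :: done) (-1) 1
          ((p0 :: tl).length + 1) hpref (by simp)
          (by simp only [List.length_cons, htl, List.length_append]; omega)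
        have he : (((p0 :: done).length : Int)) - 1 = 1 + (done.length : Int) - 1 := by
          push_cast [List.length_cons]; ring
        rw [he] at hms
        exact hms
      have hscan : (scanB N v (p0 :: tl)).2
          = ((v :: suf).foldl (scanStep (p0 :: tl) N v) (1, -1)).2 := by
        rw [scanB_eq_foldl]
        have hdrop : (p0 :: tl).drop 1 = done ++ v :: suf := by rw [htl]; rfl
        rw [hdrop, List.foldl_append, scan_skip (p0 :: tl) N v done
          (fun c hc hceq => hvd (hceq ▸ hc))]
      have hstB : stepB S N (p0 :: tl) st v
          = (max st.1 ((v :: suf).foldl (scanStep (p0 :: tl) N v) (1, -1)).2, st.2.add v) := by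
        unfold stepB
        rw [hbool, hscan]
        rfl
      have hstA : stepA S N (buildIdx (p0 :: tl)) (p0 :: tl) st (1 + (done.length : Int), v)
          = (max st.1 ((v :: suf).foldl (scanStep (p0 :: tl) N v) (1, -1)).2, st.2.add v) := by
        unfold stepA
        dsimp only
        rw [hne0, Bool.false_or, hbool, hwa]
        rfl
      rw [hstA, hstB, hstart]
      apply ih (done ++ [v]) (max st.1 ((v :: suf).foldl (scanStep (p0 :: tl) N v) (1, -1)).2,
        st.2.add v) (by rw [htl]; simp)
      intro w
      dsimp only
      rw [PySem.Set.contains_iff, PySem.Set.mem_add]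
      constructor
      · rintro (hw | rfl)
        · have := (hmeminv w).mp hw
          exact ⟨by simp [this.1], this.2⟩
        · exact ⟨by simp, hpass⟩
      · rintro ⟨hw, hp⟩
        rcases List.mem_append.mp hw with hw | hw
        · exact Or.inl ((hmeminv w).mpr ⟨hw, hp⟩)
        · exact Or.inr (by simpa using hw)

theorem solve_eq (N : Int) (A : List Int) : solve N A = solve_alt N A := by
  obtain ⟨tl, htl⟩ : ∃ tl, List.scanl (· + ·) 0 A = 0 :: tl := by
    cases A with
    | nil => exact ⟨[], rfl⟩
    | cons a l => exact ⟨List.scanl (· + ·) (0 + a) l, by simp [List.scanl_cons]⟩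
  simp only [solve, solve_alt]
  rw [buildPref_eq, buildPrefB_eq, htl]
  rw [PySem.List.enumerate_cons, List.foldl_cons]
  have h0 : stepA A.sum N (buildIdx (0 :: tl)) (0 :: tl) (1, PySem.Set.ofList []) ((0 : Int), (0 : Int))
      = (1, PySem.Set.ofList []) := by
    unfold stepA
    dsimp only
    rw [show ((0 : Int) == 0) = true by rfl, Bool.true_or]
    rfl
  rw [h0]
  have hout := outer_loop A.sum N 0 tl tl [] (1, PySem.Set.ofList []) (by simp)
    (by
      intro w
      constructor
      · intro h
        simp [PySem.Set.ofList] at h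
      · rintro ⟨h, _⟩
        simp at h)
  rw [show (0 : Int) + 1 = 1 + (((List.length ([] : List Int)) : Int)) by simp]
  rw [hout]
  rfl

-- ===== VERDICT (by name: the statement is the Claim_ definition above) =====
theorem solve_spec : Claim_equal_solve := by
  intro N A _ _
  unfold Spec_solve
  exact solve_eq N A
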